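-- pv_equiv track=rewrite | github.com/YukunQu/DCM | analysis/mri/event/event_cv.py | _split_whole_trials
-- ===== SOURCE A (Python) =====
-- def _split_whole_trials(trial_corr):
--     i = 0
--     trial_label = []
--     for tc in trial_corr:
--         i += 1
--         if i % 2 == 0:
--             trial_label.append('even')
--         else:
--             trial_label.append('odd')
--     return trial_label
-- ===== SOURCE B (Python) =====
-- def _split_whole_trials(trial_corr):
--     n = sum(1 for _ in trial_corr)
--     pat = ['odd', 'even'] * ((n + 1) // 2)
--     return pat[:n]
-- ===== Notes on version B (the rewrite author's own statement) =====
-- stated objective: idiomatic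
-- what changed: B counts the trials once and builds the labels by tiling the fixed pattern ['odd','even'] and slicing to length n, instead of A's per-element loop with a running counter and a parity branch.
import Mathlib
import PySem

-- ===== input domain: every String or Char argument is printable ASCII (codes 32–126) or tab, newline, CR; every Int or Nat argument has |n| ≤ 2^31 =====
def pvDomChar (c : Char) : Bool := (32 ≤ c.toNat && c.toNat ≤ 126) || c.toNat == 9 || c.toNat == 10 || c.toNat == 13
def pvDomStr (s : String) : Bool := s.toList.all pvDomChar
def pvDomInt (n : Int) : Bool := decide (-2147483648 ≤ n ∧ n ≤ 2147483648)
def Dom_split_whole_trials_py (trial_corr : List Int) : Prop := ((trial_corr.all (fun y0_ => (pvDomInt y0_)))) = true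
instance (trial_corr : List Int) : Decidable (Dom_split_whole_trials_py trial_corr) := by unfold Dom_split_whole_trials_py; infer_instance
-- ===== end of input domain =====

-- B tiles the fixed pattern ["odd","even"] and slices to the counted length instead of A's counter loop with a parity branch; objective: idiomatic, same cost.

-- ===== PORT A =====
-- loop: i += 1; append "even" if i % 2 == 0 else "odd"
def pvALoop (i : Int) (lab : List String) : List Int → List String
  | [] => lab
  | _ :: tc =>
      pvALoop (i + 1) (lab ++ [if (i + 1) % 2 = 0 then "even" else "odd"]) tc

def split_whole_trials_py (trial_corr : List Int) : List String :=
  pvALoop 0 [] trial_corr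

-- ===== PORT B =====
def split_whole_trials_py_alt (trial_corr : List Int) : List String :=
  let n : Nat := trial_corr.foldl (fun c _ => c + 1) 0   -- n = sum(1 for _ in trial_corr)
  let pat := (List.replicate ((n + 1) / 2) ["odd", "even"]).flatten   -- ['odd','even'] * ((n+1)//2)
  pat.take n   -- pat[:n]

-- ===== PRECONDITION & SPEC =====
def Spec_split_whole_trials_py (trial_corr : List Int) (out : List String) : Prop := out = split_whole_trials_py_alt trial_corr
instance (trial_corr : List Int) (out : List String) : Decidable (Spec_split_whole_trials_py trial_corr out) := by unfold Spec_split_whole_trials_py; infer_instance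

-- ===== CLAIM (what is proved, stated in full; the proofs are below) =====
def Claim_equal_split_whole_trials_py : Prop := ∀ (trial_corr : List Int), Dom_split_whole_trials_py trial_corr → Spec_split_whole_trials_py trial_corr (split_whole_trials_py trial_corr)

-- ===== LEMMAS AND PROOFS =====

-- reference alternating sequence: gen n true = ["odd","even","odd",…] of length n
def pvGen : Nat → Bool → List String
  | 0, _ => []
  | n + 1, b => (if b then "odd" else "even") :: pvGen n (!b)

theorem pvALoop_eq_gen (xs : List Int) : ∀ (i : Int) (lab : List String),
    pvALoop i lab xs = lab ++ pvGen xs.length (decide ((i + 1) % 2 ≠ 0)) := by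
  induction xs with
  | nil => intro i lab; simp [pvALoop, pvGen]
  | cons x xs ih =>
      intro i lab
      rw [pvALoop, ih]
      have hswap : (decide ((i + 1 + 1) % 2 ≠ 0)) = !(decide ((i + 1) % 2 ≠ 0)) := by
        by_cases h : (i + 1) % 2 = 0 <;> simp [h] <;> omega
      simp only [List.length_cons, pvGen, hswap]
      by_cases h : (i + 1) % 2 = 0 <;> simp [h]

theorem pvCount_eq_length (xs : List Int) : ∀ (k : Nat),
    xs.foldl (fun c _ => c + 1) k = k + xs.length := by
  induction xs with
  | nil => simp
  | cons x xs ih => intro k; simp [List.foldl, ih]; omega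

theorem pvTile_eq_gen : ∀ (m n : Nat), n ≤ 2 * m →
    ((List.replicate m ["odd", "even"]).flatten).take n = pvGen n true := by
  intro m
  induction m with
  | zero => intro n h; interval_cases n; rfl
  | succ m ih =>
      intro n h
      match n with
      | 0 => rfl
      | 1 => simp [List.replicate, pvGen]
      | n + 2 =>
          simp only [List.replicate, List.flatten_cons, List.cons_append,
            List.take_succ_cons, pvGen, Bool.not_true, Bool.not_false]
          rw [List.nil_append, ih n (by omega)]
          simp

-- ===== VERDICT (by name: the statement is the Claim_ definition above) =====
theorem split_whole_trials_py_spec : Claim_equal_split_whole_trials_py := by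
  intro xs _
  show _ = _
  rw [split_whole_trials_py, pvALoop_eq_gen]
  unfold split_whole_trials_py_alt
  rw [pvCount_eq_length xs 0, Nat.zero_add, pvTile_eq_gen _ xs.length (by omega)]
  norm_num
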